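-- pv_equiv track=rewrite | github.com/joshem163/TCL | modules.py | process_thresholds
-- ===== SOURCE A (Python) =====
-- from collections import Counter
--
-- def process_thresholds(lst, N):
--     if N < 2:
--         raise ValueError("N must be at least 2 to include min and max thresholds.")
--
--     # Count occurrences of each value
--     count = Counter(lst)
--
--     # Find the minimum and maximum values
--     min_val, max_val = min(lst), max(lst)
--
--     # Remove min and max from the counting
--     count.pop(min_val, None)
--     count.pop(max_val, None)
--
--     # Select the N-1 values with the highest counts
--     top_values = sorted(count.items(), key=lambda x: x[1], reverse=True)[:N - 1]
--
--     # Prepare the thresholds: a_0=min, top N-1 values, a_N=max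
--     thresholds = [min_val] + [value for value, _ in top_values] + [max_val]
--
--     return sorted(thresholds)
-- ===== SOURCE B (Python) =====
-- from collections import Counter
--
-- def process_thresholds(lst, N):
--     if N < 2:
--         raise ValueError("N must be at least 2 to include min and max thresholds.")
--
--     count = Counter(lst)
--     min_val, max_val = min(lst), max(lst)
--     count.pop(min_val, None)
--     count.pop(max_val, None)
--
--     # Bucket the remaining values by their count (buckets keep first-seen order),
--     # then walk the distinct counts in descending order instead of sorting the items.
--     by_count = {}
--     for value, c in count.items():
--         by_count.setdefault(c, []).append(value)
--     ordered = []
--     for c in sorted(by_count, reverse=True):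
--         ordered += by_count[c]
--
--     thresholds = [min_val] + ordered[:N - 1] + [max_val]
--     return sorted(thresholds)
-- ===== Notes on version B (the rewrite author's own statement) =====
-- stated objective: alternative
-- what changed: Replaces the stable descending sort of count.items() plus slice with a bucket-by-count dict (buckets in first-seen order) walked over the distinct counts in descending order, concatenated and then sliced.
import Mathlib
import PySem

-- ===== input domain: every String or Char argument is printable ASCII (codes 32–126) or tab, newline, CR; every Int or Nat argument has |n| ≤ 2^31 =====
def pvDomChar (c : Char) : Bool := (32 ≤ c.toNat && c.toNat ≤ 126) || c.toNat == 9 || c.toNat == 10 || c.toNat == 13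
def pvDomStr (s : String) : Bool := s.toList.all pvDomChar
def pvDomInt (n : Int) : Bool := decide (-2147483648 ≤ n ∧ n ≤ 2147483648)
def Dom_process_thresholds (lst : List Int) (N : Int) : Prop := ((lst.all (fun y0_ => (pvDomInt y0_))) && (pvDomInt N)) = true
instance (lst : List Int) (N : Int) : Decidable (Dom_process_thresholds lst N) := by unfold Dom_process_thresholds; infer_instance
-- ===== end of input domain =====

-- B replaces A's stable descending sort of the (value, count) items by a bucket-by-count
-- dict walked over the distinct counts in descending order (objective: alternative).

-- ===== PORT A =====
-- Literal port of A; on the inputs where the Python raises (N < 2 or empty lst) it returns [],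
-- and Pre_ excludes exactly those inputs.
def process_thresholds (lst : List Int) (N : Int) : List Int :=
  if N < 2 then []  -- Python: raise ValueError (excluded by Pre_)
  else
    match PySem.List.min? lst (fun x => x), PySem.List.max? lst (fun x => x) with
    | some min_val, some max_val =>
      let count := ((PySem.Dict.counter lst).erase min_val).erase max_val
      let top_values := PySem.List.slice (PySem.List.sorted count.items (fun p => p.2) true) none (some (N - 1))
      let thresholds := [min_val] ++ top_values.map (fun p => p.1) ++ [max_val]
      PySem.List.sorted thresholds (fun x => x) false
    | _, _ => []  -- Python: min/max of empty list raises ValueError (excluded by Pre_)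

-- ===== PORT B =====
def process_thresholds_alt (lst : List Int) (N : Int) : List Int :=
  if N < 2 then []  -- Python: raise ValueError (excluded by Pre_)
  else
    match PySem.List.min? lst (fun x => x) with
    | none => []  -- Python: min of empty list raises ValueError (excluded by Pre_)
    | some min_val =>
      match PySem.List.max? lst (fun x => x) with
      | none => []  -- Python: max of empty list raises ValueError (excluded by Pre_)
      | some max_val =>
        let count := ((PySem.Dict.counter lst).erase min_val).erase max_val
        let by_count : PySem.Dict Int (List Int) :=
          count.items.foldl (fun d p => d.modify p.2 [] (fun b => b ++ [p.1])) PySem.Dict.empty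
        let ordered := (PySem.List.sorted by_count.keys (fun c => c) true).foldl
          (fun acc c => acc ++ by_count.getD c []) []
        let thresholds := [min_val] ++ PySem.List.slice ordered none (some (N - 1)) ++ [max_val]
        PySem.List.sorted thresholds (fun x => x) false

-- ===== PRECONDITION & SPEC =====
-- Pre_ excludes exactly the inputs where the Python A raises ValueError: N < 2, or the empty list
-- (min()/max() of an empty sequence).
def Pre_process_thresholds (lst : List Int) (N : Int) : Prop := lst ≠ [] ∧ 2 ≤ N
instance (lst : List Int) (N : Int) : Decidable (Pre_process_thresholds lst N) := by
  unfold Pre_process_thresholds; infer_instance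
def pvWitness_process_thresholds : List Int × Int := ([1, 2, 2, 3], 2)
def Spec_process_thresholds (lst : List Int) (N : Int) (out : List Int) : Prop := out = process_thresholds_alt lst N
instance (lst : List Int) (N : Int) (out : List Int) : Decidable (Spec_process_thresholds lst N out) := by unfold Spec_process_thresholds; infer_instance

-- ===== CLAIM (what is proved, stated in full; the proofs are below) =====
def Claim_equal_process_thresholds : Prop := ∀ (lst : List Int) (N : Int), Dom_process_thresholds lst N → Pre_process_thresholds lst N → Spec_process_thresholds lst N (process_thresholds lst N)

-- ===== LEMMAS AND PROOFS =====

-- insertBy skips a prefix none of whose elements satisfy the test.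
theorem pv_insertBy_append_left {α : Type} (before : α → α → Bool) (x : α) (ys zs : List α)
    (h : ∀ y ∈ ys, before x y = false) :
    PySem.List.insertBy before x (ys ++ zs) = ys ++ PySem.List.insertBy before x zs := by
  induction ys with
  | nil => simp
  | cons y ys ih =>
    have hy := h y (by simp)
    simp only [List.cons_append, PySem.List.insertBy, hy, Bool.false_eq_true, if_false,
      List.cons.injEq, true_and]
    exact ih (fun y hy => h y (by simp [hy]))

-- insertBy puts x in front when the test fires on every element.
theorem pv_insertBy_all_before {α : Type} (before : α → α → Bool) (x : α) (ys : List α)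
    (h : ∀ y ∈ ys, before x y = true) :
    PySem.List.insertBy before x ys = x :: ys := by
  cases ys with
  | nil => rfl
  | cons y ys => simp [PySem.List.insertBy, h y (by simp)]

theorem pv_flatMap_congr_mem {α β : Type} (l : List α) (f g : α → List β)
    (h : ∀ c ∈ l, f c = g c) : l.flatMap f = l.flatMap g := by
  induction l with
  | nil => rfl
  | cons c l ih => simp [List.flatMap_cons, h c (by simp), ih (fun c hc => h c (by simp [hc]))]

-- distinct counts, sorted descending, are strictly descending
theorem pv_ds_pairwise_gt (ks : List Int) :
    (PySem.List.sorted (PySem.Set.ofList ks) (fun c => c) true).Pairwise (fun a b => b < a) := by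
  have hperm := PySem.List.sorted_perm (PySem.Set.ofList ks) (fun c : Int => c) true
  have hnd : (PySem.List.sorted (PySem.Set.ofList ks) (fun c : Int => c) true).Nodup :=
    hperm.nodup_iff.mpr (PySem.Set.nodup_ofList ks)
  have hpw := PySem.List.sorted_pairwise_rev (PySem.Set.ofList ks) (fun c : Int => c)
  have := List.Pairwise.and hpw hnd
  exact this.imp (fun {a b} h => lt_of_le_of_ne h.1 (fun he => h.2 he.symm))

theorem pv_dropWhile_head_false {α : Type} (p : α → Bool) (l : List α) (b : α) (t : List α)
    (h : l.dropWhile p = b :: t) : p b = false := by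
  induction l with
  | nil => simp at h
  | cons y ys ih =>
    rw [List.dropWhile_cons] at h
    split_ifs at h with hy
    · exact ih h
    · cases h; simpa using hy

-- every element of a bucket carries its count
theorem pv_mem_bucket {l : List (Int × Int)} {c : Int} {y : Int × Int}
    (h : y ∈ l.filter (fun p => p.2 == c)) : y.2 = c := by
  have := List.of_mem_filter h
  simpa using this

theorem pv_mem_flat {A : List Int} {l : List (Int × Int)} {y : Int × Int}
    (h : y ∈ A.flatMap (fun c => l.filter (fun p => p.2 == c))) : y.2 ∈ A := by
  rcases List.mem_flatMap.mp h with ⟨c, hc, hy⟩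
  rw [pv_mem_bucket hy]; exact hc

-- one foldl-insert step of the reverse sort
theorem pv_sorted_rev_append_singleton {α κ : Type} [LT κ] [DecidableLT κ]
    (l : List α) (x : α) (key : α → κ) :
    PySem.List.sorted (l ++ [x]) key true
      = PySem.List.insertBy (fun a b => decide (key b < key a)) x (PySem.List.sorted l key true) := by
  rw [PySem.List.sorted_rev_eq_foldl_insertBy, PySem.List.sorted_rev_eq_foldl_insertBy,
    List.foldl_append]
  rfl

-- THE KEY LEMMA: the stable descending sort by count equals the concatenation of the
-- first-seen-order buckets over the strictly descending distinct counts.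
theorem pv_stable_sort_eq_buckets (l : List (Int × Int)) :
    PySem.List.sorted l (fun p => p.2) true
      = (PySem.List.sorted (PySem.Set.ofList (l.map (fun p => p.2))) (fun c => c) true).flatMap
          (fun c => l.filter (fun p => p.2 == c)) := by
  induction l using List.reverseRecOn with
  | nil => rfl
  | append_singleton l x ih =>
    have hstep := pv_sorted_rev_append_singleton l x (fun p => p.2)
    have hofl : PySem.Set.ofList ((l ++ [x]).map (fun p => p.2))
        = (PySem.Set.ofList (l.map (fun p => p.2))).add x.2 := by
      rw [List.map_append]
      simp only [List.map_cons, List.map_nil]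
      exact PySem.Set.ofList_append_singleton _ _
    have hfilt : ∀ c : Int, (l ++ [x]).filter (fun p => p.2 == c)
        = l.filter (fun p => p.2 == c) ++ (if x.2 = c then [x] else []) := by
      intro c
      rw [List.filter_append]
      congr 1
      by_cases h : x.2 = c
      · simp [List.filter, h]
      · have hb : (x.2 == c) = false := beq_eq_false_iff_ne.mpr h
        simp [List.filter, hb, h]
    have hgt := pv_ds_pairwise_gt (l.map (fun p => p.2))
    by_cases hc : x.2 ∈ PySem.Set.ofList (l.map (fun p => p.2))
    · -- the count x.2 already occurs: the distinct-count list is unchanged,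
      -- x goes to the end of its bucket
      have hadd : (PySem.Set.ofList (l.map (fun p => p.2))).add x.2
          = PySem.Set.ofList (l.map (fun p => p.2)) := PySem.Set.add_of_mem hc
      have hmemds : x.2 ∈ PySem.List.sorted (PySem.Set.ofList (l.map (fun p => p.2))) (fun c => c) true :=
        (PySem.List.mem_sorted _ _ _ _).mpr hc
      obtain ⟨A, B, hAB⟩ := List.append_of_mem hmemds
      rw [hAB] at hgt
      rw [List.pairwise_append] at hgt
      have hA : ∀ a ∈ A, x.2 < a := fun a ha => hgt.2.2 a ha x.2 (by simp)
      have hB : ∀ b ∈ B, b < x.2 := fun b hb => (List.pairwise_cons.mp hgt.2.1).1 b hb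
      have hAbk : A.flatMap (fun c => (l ++ [x]).filter (fun p => p.2 == c))
          = A.flatMap (fun c => l.filter (fun p => p.2 == c)) := by
        apply pv_flatMap_congr_mem
        intro c hcA
        rw [hfilt c, if_neg (by intro he; subst he; exact absurd (hA _ hcA) (lt_irrefl _)),
          List.append_nil]
      have hBbk : B.flatMap (fun c => (l ++ [x]).filter (fun p => p.2 == c))
          = B.flatMap (fun c => l.filter (fun p => p.2 == c)) := by
        apply pv_flatMap_congr_mem
        intro c hcB
        rw [hfilt c, if_neg (by intro he; subst he; exact absurd (hB _ hcB) (lt_irrefl _)),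
          List.append_nil]
      have hfull : (A ++ x.2 :: B).flatMap (fun c => (l ++ [x]).filter (fun p => p.2 == c))
          = A.flatMap (fun c => l.filter (fun p => p.2 == c))
            ++ ((l.filter (fun p => p.2 == x.2) ++ [x])
              ++ B.flatMap (fun c => l.filter (fun p => p.2 == c))) := by
        rw [List.flatMap_append, List.flatMap_cons, hAbk, hBbk, hfilt x.2, if_pos rfl]
      rw [hstep, ih, hofl, hadd, hAB, hfull]
      rw [List.flatMap_append, List.flatMap_cons, ← List.append_assoc]
      rw [pv_insertBy_append_left _ x
        (A.flatMap (fun c => l.filter (fun p => p.2 == c)) ++ l.filter (fun p => p.2 == x.2)) _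
        (by
          intro y hy
          simp only [decide_eq_false_iff_not, not_lt]
          rcases List.mem_append.mp hy with hy | hy
          · exact le_of_lt (hA _ (pv_mem_flat hy))
          · exact le_of_eq (pv_mem_bucket hy).symm)]
      rw [pv_insertBy_all_before _ x _
        (by
          intro y hy
          simp only [decide_eq_true_eq]
          exact hB _ (pv_mem_flat hy))]
      simp
    · -- a new count: it is inserted into the distinct-count list, its bucket is [x]
      have hadd : (PySem.Set.ofList (l.map (fun p => p.2))).add x.2
          = PySem.Set.ofList (l.map (fun p => p.2)) ++ [x.2] := PySem.Set.add_of_not_mem hc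
      have hds' : PySem.List.sorted (PySem.Set.ofList (l.map (fun p => p.2)) ++ [x.2]) (fun c => c) true
          = PySem.List.insertBy (fun a b => decide (b < a)) x.2
              (PySem.List.sorted (PySem.Set.ofList (l.map (fun p => p.2))) (fun c => c) true) :=
        pv_sorted_rev_append_singleton _ x.2 (fun c => c)
      have hxnol : ∀ p ∈ l, ¬ p.2 = x.2 := by
        intro p hp he
        exact hc ((PySem.Set.mem_ofList _ _).mpr (List.mem_map.mpr ⟨p, hp, he⟩))
      have hbx : l.filter (fun p => p.2 == x.2) = [] := by
        rw [List.filter_eq_nil_iff]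
        intro p hp
        simpa using hxnol p hp
      -- split ds at the first count below x.2
      have hsplit : PySem.List.sorted (PySem.Set.ofList (l.map (fun p => p.2))) (fun c => c) true
          = (PySem.List.sorted (PySem.Set.ofList (l.map (fun p => p.2))) (fun c => c) true).takeWhile
              (fun a => decide (x.2 < a))
            ++ (PySem.List.sorted (PySem.Set.ofList (l.map (fun p => p.2))) (fun c => c) true).dropWhile
              (fun a => decide (x.2 < a)) :=
        (List.takeWhile_append_dropWhile).symm
    /-·-/
      generalize hdsv : PySem.List.sorted (PySem.Set.ofList (l.map (fun p => p.2))) (fun c => c) true = ds at *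
      generalize hAv : ds.takeWhile (fun a => decide (x.2 < a)) = A at *
      generalize hBv : ds.dropWhile (fun a => decide (x.2 < a)) = B at *
      have hA : ∀ a ∈ A, x.2 < a := by
        intro a ha
        have := List.mem_takeWhile_imp (hAv ▸ ha)
        simpa using this
      have hxnods : x.2 ∉ ds := by
        rw [← hdsv]
        intro h
        exact hc ((PySem.List.mem_sorted _ _ _ _).mp h)
      have hB : ∀ b ∈ B, b < x.2 := by
        cases hBc : B with
        | nil => simp
        | cons b0 B' =>
          have hb0 : ¬ x.2 < b0 := by
            have := pv_dropWhile_head_false _ _ _ _ (hBv.trans hBc)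
            simpa using this
          have hb0ds : b0 ∈ ds := by
            rw [hsplit, hBc]; simp
          have hb0lt : b0 < x.2 :=
            lt_of_le_of_ne (not_lt.mp hb0) (fun he => hxnods (he ▸ hb0ds))
          have hpwB : B.Pairwise (fun a b => b < a) := (hBv ▸ (hgt.sublist (List.dropWhile_sublist _)))
          intro b hb
          rw [hBc] at hpwB
          rcases List.mem_cons.mp hb with rfl | hb'
          · exact hb0lt
          · exact lt_trans ((List.pairwise_cons.mp hpwB).1 b hb') hb0lt
      have hds'' : PySem.List.insertBy (fun a b => decide (b < a)) x.2 ds = A ++ x.2 :: B := by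
        rw [hsplit]
        rw [pv_insertBy_append_left _ x.2 A B
          (fun a ha => by simpa using not_lt.mpr (le_of_lt (hA a ha)))]
        rw [pv_insertBy_all_before _ x.2 B (fun b hb => by simpa using hB b hb)]
      have hAbk : A.flatMap (fun c => (l ++ [x]).filter (fun p => p.2 == c))
          = A.flatMap (fun c => l.filter (fun p => p.2 == c)) := by
        apply pv_flatMap_congr_mem
        intro c hcA
        rw [hfilt c, if_neg (by intro he; subst he; exact absurd (hA _ hcA) (lt_irrefl _)),
          List.append_nil]
      have hBbk : B.flatMap (fun c => (l ++ [x]).filter (fun p => p.2 == c))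
          = B.flatMap (fun c => l.filter (fun p => p.2 == c)) := by
        apply pv_flatMap_congr_mem
        intro c hcB
        rw [hfilt c, if_neg (by intro he; subst he; exact absurd (hB _ hcB) (lt_irrefl _)),
          List.append_nil]
      have hfull : (A ++ x.2 :: B).flatMap (fun c => (l ++ [x]).filter (fun p => p.2 == c))
          = A.flatMap (fun c => l.filter (fun p => p.2 == c))
            ++ ([x] ++ B.flatMap (fun c => l.filter (fun p => p.2 == c))) := by
        rw [List.flatMap_append, List.flatMap_cons, hAbk, hBbk, hfilt x.2, if_pos rfl, hbx,
          List.nil_append]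
      rw [hstep, ih, hofl, hadd, hds', hds'', hfull]
      rw [hsplit, List.flatMap_append]
      rw [pv_insertBy_append_left _ x _ _
        (by
          intro y hy
          simp only [decide_eq_false_iff_not, not_lt]
          exact le_of_lt (hA _ (pv_mem_flat hy)))]
      rw [pv_insertBy_all_before _ x _
        (by
          intro y hy
          simp only [decide_eq_true_eq]
          exact hB _ (pv_mem_flat hy))]
      simp

-- slicing commutes with map (the lengths agree)
theorem pv_slice_map {α β : Type} (f : α → β) (z : List α) (k : Int) :
    PySem.List.slice (z.map f) none (some k) = (PySem.List.slice z none (some k)).map f := by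
  simp [PySem.List.slice, PySem.List.clampIdx, List.length_map, List.map_take]

-- B's bucket walk produces exactly the values of A's stably sorted items
theorem pv_ordered_eq (items : List (Int × Int)) :
    ((PySem.List.sorted
        ((items.foldl (fun d p => d.modify p.2 [] (fun b => b ++ [p.1])) PySem.Dict.empty).keys)
        (fun c => c) true).foldl
      (fun acc c => acc ++
        (items.foldl (fun d p => d.modify p.2 [] (fun b => b ++ [p.1])) PySem.Dict.empty).getD c [])
      [])
    = (PySem.List.sorted items (fun p => p.2) true).map (fun p => p.1) := by
  have hsw : items.foldl (fun d p => d.modify p.2 [] (fun b => b ++ [p.1])) PySem.Dict.empty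
      = (items.map Prod.swap).foldl (fun d p => d.modify p.1 [] (fun b => b ++ [p.2]))
          PySem.Dict.empty := by
    rw [List.foldl_map]
    rfl
  have hkeys : (items.foldl (fun d p => d.modify p.2 [] (fun b => b ++ [p.1]))
        PySem.Dict.empty).keys = PySem.Set.ofList (items.map (fun p => p.2)) := by
    rw [PySem.Dict.keys_foldl_modify_key items (fun p => p.2) [] (fun _ p => fun b => b ++ [p.1])
      PySem.Dict.empty, PySem.Dict.keys_empty, PySem.Set.update_nil_left]
  have hgetD : ∀ c : Int, (items.foldl (fun d p => d.modify p.2 [] (fun b => b ++ [p.1]))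
        PySem.Dict.empty).getD c [] = (items.filter (fun p => p.2 == c)).map (fun p => p.1) := by
    intro c
    rw [hsw, PySem.Dict.getD_foldl_modify_append, PySem.Dict.getD_empty, List.nil_append,
      List.filter_map, List.map_map]
    rfl
  rw [PySem.List.foldl_append_eq_flatMap, List.nil_append, hkeys]
  have hcongr := pv_flatMap_congr_mem
    (PySem.List.sorted (PySem.Set.ofList (items.map (fun p => p.2))) (fun c => c) true)
    (fun c => (items.foldl (fun d p => d.modify p.2 [] (fun b => b ++ [p.1]))
        PySem.Dict.empty).getD c [])
    (fun c => (items.filter (fun p => p.2 == c)).map (fun p => p.1))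
    (fun c _ => hgetD c)
  rw [hcongr, ← List.map_flatMap, ← pv_stable_sort_eq_buckets]

-- ===== VERDICT (by name: the statement is the Claim_ definition above) =====
theorem process_thresholds_spec : Claim_equal_process_thresholds := by
  intro lst N _ _
  unfold Spec_process_thresholds process_thresholds process_thresholds_alt
  by_cases hN : N < 2
  · simp [hN]
  · simp only [hN, if_false]
    cases hmn : PySem.List.min? lst (fun x => x) with
    | none => rfl
    | some mn =>
      cases hmx : PySem.List.max? lst (fun x => x) with
      | none => rfl
      | some mx =>
        simp only []
        refine congrArg (fun t => PySem.List.sorted t (fun x : Int => x) false) ?_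
        rw [pv_ordered_eq, ← pv_slice_map]
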